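-- pv_equiv track=rewrite | github.com/Sirivasv/ProgrammingChallenges | codeforces/1138/A.py | solve
-- ===== SOURCE A (Python) =====
-- def solve(input_elements):
--     input_len = len(input_elements)
--     last_viewed_element = -1
--     group_id = 0
--     size_of_group = []
--     for i in range(input_len):
--         if i == 0:
--             last_viewed_element = input_elements[i]
--             size_of_group.append(1)
--             continue
--         if input_elements[i] == last_viewed_element:
--             size_of_group[group_id] += 1
--             continue
--         last_viewed_element = input_elements[i]
--         group_id += 1
--         size_of_group.append(1)
--     group_id = 0
--     current_answer = 0
--     for i in range(input_len):
--         if i == 0: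
--             last_viewed_element = input_elements[i]
--             continue
--         if input_elements[i] == last_viewed_element:
--             continue
--         last_viewed_element = input_elements[i]
--         group_id += 1
--         current_answer = max(current_answer, min(size_of_group[group_id], size_of_group[group_id - 1]))
--     return current_answer
-- ===== SOURCE B (Python) =====
-- def solve(input_elements):
--     best = 0
--     prev_run = 0
--     cur_run = 0
--     last = None
--     for x in input_elements:
--         if cur_run and x == last:
--             cur_run += 1
--         else:
--             if prev_run:
--                 best = max(best, min(prev_run, cur_run))
--             prev_run = cur_run
--             cur_run = 1
--             last = x
--     if prev_run:
--         best = max(best, min(prev_run, cur_run))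
--     return best
-- ===== Notes on version B (the rewrite author's own statement) =====
-- stated objective: alternative
-- what changed: B never materialises the group-sizes list and never re-scans the input: a single streaming pass over three integer counters (best, previous run length, current run length) folds max(min(prev,cur)) at each value change, replacing A's two input scans and O(n) sizes array with O(1) state.
import Mathlib
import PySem

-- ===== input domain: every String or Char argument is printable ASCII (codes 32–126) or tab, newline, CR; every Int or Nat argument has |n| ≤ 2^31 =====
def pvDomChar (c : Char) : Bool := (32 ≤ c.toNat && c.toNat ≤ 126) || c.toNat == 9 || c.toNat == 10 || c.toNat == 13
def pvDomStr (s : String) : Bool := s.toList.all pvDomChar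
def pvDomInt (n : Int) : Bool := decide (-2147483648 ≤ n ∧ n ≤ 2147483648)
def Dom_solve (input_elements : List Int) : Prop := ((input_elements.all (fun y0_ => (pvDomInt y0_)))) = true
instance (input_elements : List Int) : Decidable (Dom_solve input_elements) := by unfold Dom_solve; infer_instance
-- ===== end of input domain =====

-- B replaces A's group-sizes list and second input scan with one streaming pass over
-- three integer counters (best, previous run length, current run length): simpler, O(1) space.

-- ===== PORT A =====
-- first loop body for i > 0 (the i == 0 iteration is unrolled into the initial state)
def stepA1 (st : Int × Nat × List Int) (y : Int) : Int × Nat × List Int :=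
  let (last, gid, sog) := st
  if y = last then (last, gid, sog.modify gid (· + 1))
  else (y, gid + 1, sog ++ [1])

-- second loop body for i > 0; size_of_group[group_id] is always in range in A,
-- so getD _ 0 is exact here
def stepA2 (sog : List Int) (st : Int × Nat × Int) (y : Int) : Int × Nat × Int :=
  let (last, gid, ans) := st
  if y = last then (last, gid, ans)
  else (y, gid + 1, max ans (min (sog.getD (gid + 1) 0) (sog.getD gid 0)))

def solve (input_elements : List Int) : Int :=
  match input_elements with
  | [] => 0
  | x :: xs =>
    let sog := (xs.foldl stepA1 (x, 0, [(1 : Int)])).2.2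
    (xs.foldl (stepA2 sog) (x, 0, 0)).2.2

-- ===== PORT B =====
-- loop body of B: state (best, prev_run, cur_run, last); Python's `last = None`
-- start is represented by cur_run = 0 guarding the comparison, exactly as in Source B
def stepB (st : Int × Int × Int × Int) (x : Int) : Int × Int × Int × Int :=
  let (best, prev, cur, last) := st
  if cur ≠ 0 ∧ x = last then (best, prev, cur + 1, last)
  else ((if prev ≠ 0 then max best (min prev cur) else best), cur, 1, x)

def solve_alt (input_elements : List Int) : Int :=
  let (best, prev, cur, _) := input_elements.foldl stepB (0, 0, 0, 0)
  if prev ≠ 0 then max best (min prev cur) else best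

-- ===== PRECONDITION & SPEC =====
def Spec_solve (input_elements : List Int) (out : Int) : Prop := out = solve_alt input_elements
instance (input_elements : List Int) (out : Int) : Decidable (Spec_solve input_elements out) := by unfold Spec_solve; infer_instance

-- ===== CLAIM (what is proved, stated in full; the proofs are below) =====
def Claim_equal_solve : Prop := ∀ (input_elements : List Int), Dom_solve input_elements → Spec_solve input_elements (solve input_elements)

-- ===== LEMMAS AND PROOFS =====

-- proof-side reference: the run-length-sizes fold (used only to relate A and B)
def incLast : List Int → List Int
  | [] => []
  | [a] => [a + 1]
  | a :: b :: r => a :: incLast (b :: r)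

def stepRL (st : List Int × Int) (x : Int) : List Int × Int :=
  if st.1 ≠ [] ∧ x = st.2 then (incLast st.1, x) else (st.1 ++ [1], x)

-- max-of-min fold over consecutive pairs of a sizes list, with accumulator b
def pairAcc (b : Int) (S : List Int) : Int :=
  (S.zip S.tail).foldl (fun acc p => max acc (min p.1 p.2)) b

-- B's final extraction
def finB (b p c : Int) : Int := if p ≠ 0 then max b (min p c) else b

-- number of group boundaries in x :: xs
def nb (x : Int) : List Int → Nat
  | [] => 0
  | y :: ys => if y = x then nb x ys else nb y ys + 1

theorem incLast_eq_modify (s : List Int) (h : s ≠ []) :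
    incLast s = s.modify (s.length - 1) (· + 1) := by
  induction s with
  | nil => simp at h
  | cons a r ih =>
    cases r with
    | nil => simp [incLast, List.modify]
    | cons b t =>
      simp only [incLast, List.length_cons]
      rw [ih (by simp)]
      simp [List.modify]

theorem incLast_ne_nil (s : List Int) (h : s ≠ []) : incLast s ≠ [] := by
  cases s with
  | nil => exact absurd rfl h
  | cons a r => cases r <;> simp [incLast]

-- Phase 1 of A and the run-length fold agree.
theorem phase1_eq (xs : List Int) : ∀ (x : Int) (s : List Int), s ≠ [] →
    (xs.foldl stepA1 (x, s.length - 1, s)).2.2 = (xs.foldl stepRL (s, x)).1 := by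
  induction xs with
  | nil => intro x s hs; simp
  | cons y ys ih =>
    intro x s hs
    by_cases h : y = x
    · have e1 : stepA1 (x, s.length - 1, s) y = (x, s.length - 1, s.modify (s.length - 1) (· + 1)) := by
        simp [stepA1, h]
      have e2 : stepRL (s, x) y = (incLast s, y) := by
        simp [stepRL, h, hs]
      rw [List.foldl_cons, List.foldl_cons, e1, e2, ← incLast_eq_modify s hs, h]
      have hlen : (incLast s).length = s.length := by
        rw [incLast_eq_modify s hs]; simp
      have := ih x (incLast s) (incLast_ne_nil s hs)
      rw [hlen] at this
      exact this
    · have e1 : stepA1 (x, s.length - 1, s) y = (y, s.length - 1 + 1, s ++ [1]) := by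
        simp [stepA1, h]
      have e2 : stepRL (s, x) y = (s ++ [1], y) := by
        simp [stepRL, h]
      rw [List.foldl_cons, List.foldl_cons, e1, e2]
      have := ih y (s ++ [1]) (by simp)
      have hl : (s ++ [1]).length - 1 = (s.length - 1) + 1 := by
        cases s with
        | nil => exact absurd rfl hs
        | cons a r => simp
      rw [hl] at this
      exact this

theorem phase1_len (xs : List Int) : ∀ (x : Int) (g : Nat) (s : List Int),
    ((xs.foldl stepA1 (x, g, s)).2.2).length = s.length + nb x xs := by
  induction xs with
  | nil => intro x g s; simp [nb]
  | cons y ys ih =>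
    intro x g s
    by_cases h : y = x
    · have e1 : stepA1 (x, g, s) y = (x, g, s.modify g (· + 1)) := by simp [stepA1, h]
      rw [List.foldl_cons, e1, ih]
      simp [nb, h]
    · have e1 : stepA1 (x, g, s) y = (y, g + 1, s ++ [1]) := by simp [stepA1, h]
      rw [List.foldl_cons, e1, ih]
      simp [nb, h]
      omega

-- Phase 2 of A computes a max/min fold over the boundary indices.
theorem phase2_fold (S : List Int) (xs : List Int) : ∀ (x : Int) (g : Nat) (a : Int),
    (xs.foldl (stepA2 S) (x, g, a)).2.2 =
      (List.range (nb x xs)).foldl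
        (fun acc j => max acc (min (S.getD (g + 1 + j) 0) (S.getD (g + j) 0))) a := by
  induction xs with
  | nil => intro x g a; simp [nb]
  | cons y ys ih =>
    intro x g a
    by_cases h : y = x
    · have e : stepA2 S (x, g, a) y = (x, g, a) := by simp [stepA2, h]
      rw [List.foldl_cons, e, ih]
      simp [nb, h]
    · have e : stepA2 S (x, g, a) y =
          (y, g + 1, max a (min (S.getD (g + 1) 0) (S.getD g 0))) := by simp [stepA2, h]
      rw [List.foldl_cons, e, ih]
      have hnb : nb x (y :: ys) = nb y ys + 1 := by simp [nb, h]
      rw [hnb, List.range_succ_eq_map, List.foldl_cons, List.foldl_map]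
      congr 1
      · funext acc j
        have h1 : g + 1 + 1 + j = g + 1 + (j + 1) := by omega
        have h2 : g + 1 + j = g + (j + 1) := by omega
        rw [h1, h2]

-- consecutive pairs of S as an indexed map
theorem zip_tail_eq_map (S : List Int) :
    S.zip S.tail = (List.range (S.length - 1)).map
      (fun k => (S.getD k 0, S.getD (k + 1) 0)) := by
  induction S with
  | nil => simp
  | cons a r ih =>
    cases r with
    | nil => simp
    | cons b t =>
      simp only [List.tail_cons] at ih
      simp only [List.tail_cons, List.zip_cons_cons]
      have hl : (a :: b :: t).length - 1 = ((b :: t).length - 1) + 1 := by simp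
      rw [hl, List.range_succ_eq_map, List.map_cons, List.map_map, ih]
      simp

-- A's value is the max-of-min fold over consecutive pairs of the run-length sizes.
theorem solve_eq_pairAcc (x : Int) (xs : List Int) :
    solve (x :: xs) = pairAcc 0 ((xs.foldl stepRL ([(1 : Int)], x)).1) := by
  simp only [solve]
  set S := (xs.foldl stepA1 (x, 0, [(1 : Int)])).2.2 with hS
  have hsizes : (xs.foldl stepRL ([(1 : Int)], x)).1 = S := by
    rw [hS]
    have := phase1_eq xs x [(1 : Int)] (by simp)
    simpa using this.symm
  rw [hsizes]
  have hlen : S.length = 1 + nb x xs := by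
    rw [hS]; simpa using phase1_len xs x 0 [(1 : Int)]
  rw [phase2_fold S xs x 0 0]
  unfold pairAcc
  rw [zip_tail_eq_map S, List.foldl_map]
  have hn : S.length - 1 = nb x xs := by omega
  rw [hn]
  congr 1
  funext acc j
  simp [Nat.add_comm, min_comm]

-- the run-length fold never touches the head of a list of length ≥ 2
theorem stepRL_cons (ys : List Int) : ∀ (a : Int) (u : List Int) (x : Int), u ≠ [] →
    (ys.foldl stepRL (a :: u, x)).1 = a :: (ys.foldl stepRL (u, x)).1 := by
  induction ys with
  | nil => intro a u x h; simp
  | cons y t ih =>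
    intro a u x h
    rw [List.foldl_cons, List.foldl_cons]
    by_cases hy : y = x
    · have e1 : stepRL (a :: u, x) y = (a :: incLast u, y) := by
        cases u with
        | nil => exact absurd rfl h
        | cons b r => simp [stepRL, hy, incLast]
      have e2 : stepRL (u, x) y = (incLast u, y) := by simp [stepRL, hy, h]
      rw [e1, e2]; exact ih a _ y (incLast_ne_nil u h)
    · have e1 : stepRL (a :: u, x) y = (a :: u ++ [1], y) := by simp [stepRL, hy]
      have e2 : stepRL (u, x) y = (u ++ [1], y) := by simp [stepRL, hy]
      rw [e1, e2]
      have := ih a (u ++ [1]) y (by simp)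
      simpa using this
  

theorem pairAcc_cons (b p q : Int) (W : List Int) :
    pairAcc b (p :: q :: W) = pairAcc (max b (min p q)) (q :: W) := by
  simp [pairAcc]

-- B's streaming fold computes the pair fold over the run-length sizes it never builds:
-- the scalar state (b, p, c) stands for the sizes list [p, c] (or [c] if p = 0).
theorem stepB_eq_pairAcc (xs : List Int) : ∀ (b p c x : Int), 0 < c →
    (let st := xs.foldl stepB (b, p, c, x); finB st.1 st.2.1 st.2.2.1)
      = pairAcc b ((xs.foldl stepRL ((if p = 0 then [c] else [p, c]), x)).1) := by
  induction xs with
  | nil =>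
    intro b p c x hc
    by_cases hp : p = 0 <;> simp [finB, pairAcc, hp]
  | cons y ys ih =>
    intro b p c x hc
    rw [List.foldl_cons, List.foldl_cons]
    by_cases hy : y = x
    · subst hy
      have e1 : stepB (b, p, c, y) y = (b, p, c + 1, y) := by
        simp [stepB]; omega
      have e2 : stepRL ((if p = 0 then [c] else [p, c]), y) y
          = ((if p = 0 then [c + 1] else [p, c + 1]), y) := by
        by_cases hp : p = 0 <;> simp [stepRL, hp, incLast]
      rw [e1, e2]
      exact ih b p (c + 1) y (by omega)
    · have hcne : c ≠ 0 := by omega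
      have e1 : stepB (b, p, c, x) y
          = ((if p ≠ 0 then max b (min p c) else b), c, 1, y) := by
        simp [stepB, hy]
      have e2 : stepRL ((if p = 0 then [c] else [p, c]), x) y
          = ((if p = 0 then [c, 1] else [p, c, 1]), y) := by
        by_cases hp : p = 0 <;> simp [stepRL, hy, hp]
      rw [e1, e2]
      by_cases hp : p = 0
      · have hI := ih b c 1 y one_pos
        simp only [hcne, if_neg, not_false_eq_true] at hI
        simpa [hp] using hI
      · have hI := ih (max b (min p c)) c 1 y one_pos
        simp only [hcne, if_neg, not_false_eq_true] at hI
        rw [stepRL_cons ys c [1] y (by simp)] at hI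
        rw [if_pos hp, if_neg hp]
        rw [stepRL_cons ys p [c, 1] y (by simp), stepRL_cons ys c [1] y (by simp),
          pairAcc_cons]
        exact hI

theorem solve_eq (l : List Int) : solve l = solve_alt l := by
  cases l with
  | nil => simp [solve, solve_alt]
  | cons x xs =>
    have h0 : stepB (0, 0, 0, 0) x = (0, 0, 1, x) := by simp [stepB]
    have halt : solve_alt (x :: xs)
        = (let st := xs.foldl stepB (0, 0, 1, x); finB st.1 st.2.1 st.2.2.1) := by
      simp only [solve_alt, List.foldl_cons, h0, finB]
    rw [halt, stepB_eq_pairAcc xs 0 0 1 x (by omega), solve_eq_pairAcc x xs]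
    norm_num

-- ===== VERDICT (by name: the statement is the Claim_ definition above) =====
theorem solve_spec : Claim_equal_solve := by
  intro l _
  unfold Spec_solve
  exact solve_eq l
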